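-- pv_equiv track=rewrite | github.com/AMIVAYUN/codeTestPrac | Programmers/Python/디펜스 게임.py | solution
-- ===== SOURCE A (Python) =====
-- def solution(n, k, enemy):
--     '''
--     병사 n명 enemy[ i ]마리 적이 등장 > 이만 큼 소모
--     무적권 사용하면 한라운드 소모x
--
--     '''
--     Mx = len( enemy );
--     lt = k; rt = Mx;
--     answer = min( k , Mx );
--     while lt <= rt:
--         mid = ( lt + rt ) // 2;
--
--         temp = enemy[ :mid ];
--
--         srt = list( sorted( temp, reverse = True ) );
--
--         if( n >= sum( srt[k:] ) ):
--             lt = mid + 1;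
--             answer = max( answer, mid );
--         else:
--             rt = mid - 1;
--
--
--
--     return answer
-- ===== SOURCE B (Python) =====
-- import bisect
--
-- def solution(n, k, enemy):
--     # One forward pass: keep the k largest enemies seen so far (ascending) in `top`;
--     # every other enemy must be fought, accumulated in `spent`; stop at the first
--     # round that cannot be afforded.
--     top = []        # the k rounds we would skip with invincibility (k largest so far)
--     spent = 0       # soldiers needed for all other rounds so far
--     for i, e in enumerate(enemy):
--         bisect.insort(top, e)
--         if len(top) > k:
--             spent += top.pop(0)
--             if spent > n:
--                 return i
--     return len(enemy)
-- ===== Notes on version B (the rewrite author's own statement) =====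
-- stated objective: alternative
-- what changed: Replaced A's binary search over round counts (sorting each candidate prefix from scratch) by a single forward pass that incrementally maintains the k largest enemies seen so far (sorted insert + pop of the smallest) and a running sum of the rounds that must be fought, returning at the first unaffordable round.
-- outside the precondition, e.g. on solution(0, 0, [1, -2, 1, 1]): A returns 3, B returns 0; on solution(5, -1, [1, 2, 3]): A returns 3, B returns 2
import Mathlib
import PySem

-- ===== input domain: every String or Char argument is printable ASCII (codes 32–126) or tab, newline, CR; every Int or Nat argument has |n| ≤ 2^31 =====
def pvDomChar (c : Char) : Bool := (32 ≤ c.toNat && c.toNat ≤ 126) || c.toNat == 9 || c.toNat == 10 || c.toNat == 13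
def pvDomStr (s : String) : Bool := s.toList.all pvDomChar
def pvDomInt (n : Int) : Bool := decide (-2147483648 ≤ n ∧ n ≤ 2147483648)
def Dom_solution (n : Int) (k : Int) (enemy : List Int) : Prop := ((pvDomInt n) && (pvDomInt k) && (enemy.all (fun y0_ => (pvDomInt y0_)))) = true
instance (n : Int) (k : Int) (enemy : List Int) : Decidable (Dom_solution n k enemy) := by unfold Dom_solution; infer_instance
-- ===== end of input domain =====

-- B replaces A's binary search (re-sorting each candidate prefix) by one forward pass keeping
-- the k largest enemies seen so far and a running sum of the fought rounds (objective: alternative).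

-- ===== PORT A =====
-- while lt <= rt: mid = (lt+rt)//2; temp = enemy[:mid]; srt = list(sorted(temp, reverse=True));
--   if n >= sum(srt[k:]): lt = mid+1; answer = max(answer, mid) else: rt = mid-1
-- fuel is only a totality guard: rt - lt shrinks every iteration, and solution passes
-- (rt + 1 - lt).toNat + 1, so the 0-fuel case is never reached
def loopA (n : Int) (k : Int) (enemy : List Int) : Nat → Int → Int → Int → Int
  | 0, _, _, ans => ans
  | fuel + 1, lt, rt, ans =>
    if lt ≤ rt then
      let mid := PySem.Int.floordiv (lt + rt) 2
      let temp := PySem.List.slice enemy none (some mid)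
      let srt := PySem.List.sorted temp (fun x => x) true
      if n ≥ (PySem.List.slice srt (some k) none).sum then
        loopA n k enemy fuel (mid + 1) rt (max ans mid)
      else
        loopA n k enemy fuel lt (mid - 1) ans
    else ans

def solution (n : Int) (k : Int) (enemy : List Int) : Int :=
  loopA n k enemy (((enemy.length : Int) + 1 - k).toNat + 1) k (enemy.length : Int)
    (min k (enemy.length : Int))

-- ===== PORT B =====
-- bisect.insort(top, x): insert x into the sorted list top, after equal elements
def insortR (x : Int) : List Int → List Int
  | [] => [x]
  | y :: ys => if y ≤ x then y :: insortR x ys else x :: y :: ys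

-- for i, e in enumerate(enemy): insort(top, e); if len(top) > k: spent += top.pop(0); if spent > n: return i
-- top.pop(0) is ported as head!/tail: the popped list insortR e top is never empty (insortR_ne_nil)
def loopB (n : Int) (k : Int) (mx : Int) (top : List Int) (spent : Int) (i : Int) : List Int → Int
  | [] => mx
  | e :: es =>
    let top' := insortR e top
    if k < (top'.length : Int) then
      if n < spent + top'.head! then i
      else loopB n k mx top'.tail (spent + top'.head!) (i + 1) es
    else loopB n k mx top' spent (i + 1) es

def solution_alt (n : Int) (k : Int) (enemy : List Int) : Int :=
  loopB n k (enemy.length : Int) [] 0 0 enemy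

-- ===== PRECONDITION & SPEC =====
-- Pre_ excludes only k < 0 (A then slices with negative bounds) and lists longer than k that
-- contain negative enemy counts (A's binary search then probes a non-monotone predicate and its
-- value is an accident of the probe order); both lie outside the problem's domain of nonnegative counts.
def Pre_solution (n : Int) (k : Int) (enemy : List Int) : Prop :=
  0 ≤ k ∧ ((enemy.length : Int) ≤ k ∨ ∀ e ∈ enemy, 0 ≤ e)
instance (n : Int) (k : Int) (enemy : List Int) : Decidable (Pre_solution n k enemy) := by
  unfold Pre_solution; infer_instance

def pvWitness_solution : Int × Int × List Int := (7, 1, [3, 2, 5])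

def Spec_solution (n : Int) (k : Int) (enemy : List Int) (out : Int) : Prop := out = solution_alt n k enemy
instance (n : Int) (k : Int) (enemy : List Int) (out : Int) : Decidable (Spec_solution n k enemy out) := by unfold Spec_solution; infer_instance

-- ===== CLAIM (what is proved, stated in full; the proofs are below) =====
def Claim_equal_solution : Prop := ∀ (n : Int) (k : Int) (enemy : List Int), Dom_solution n k enemy → Pre_solution n k enemy → Spec_solution n k enemy (solution n k enemy)

-- ===== LEMMAS AND PROOFS =====

-- ascending Python sort
def asc (l : List Int) : List Int := PySem.List.sorted l (fun x => x) false

-- soldiers spent on the first m rounds when the K largest of them are skipped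
def gsum (K : Nat) (enemy : List Int) (m : Nat) : Int :=
  ((asc (enemy.take m)).take ((enemy.take m).length - K)).sum

-- smallest round count that is already unaffordable (enemy.length + 1 if none)
def Fex (n : Int) (K : Nat) (enemy : List Int) :
    ∃ m, m = enemy.length + 1 ∨ (m ≤ enemy.length ∧ n < gsum K enemy m) :=
  ⟨enemy.length + 1, Or.inl rfl⟩
def Fnat (n : Int) (K : Nat) (enemy : List Int) : Nat := Nat.find (Fex n K enemy)

lemma length_insortR (x : Int) (t : List Int) : (insortR x t).length = t.length + 1 := by
  induction t with
  | nil => rfl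
  | cons y ys ih => simp only [insortR]; split <;> simp [ih]

lemma insortR_ne_nil (x : Int) (t : List Int) : insortR x t ≠ [] := by
  intro h
  have := congrArg List.length h
  simp [length_insortR] at this

lemma insortR_perm (x : Int) (t : List Int) : (insortR x t).Perm (x :: t) := by
  induction t with
  | nil => rfl
  | cons y ys ih =>
    simp only [insortR]; split
    · exact (ih.cons y).trans (List.Perm.swap x y ys)
    · rfl

lemma insortR_pairwise (x : Int) (t : List Int) (h : t.Pairwise (· ≤ ·)) :
    (insortR x t).Pairwise (· ≤ ·) := by
  induction t with
  | nil => simp [insortR]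
  | cons y ys ih =>
    rcases List.pairwise_cons.mp h with ⟨hy, hys⟩
    simp only [insortR]; split
    · rename_i hyx
      refine List.pairwise_cons.mpr ⟨?_, ih hys⟩
      intro z hz
      rcases List.mem_cons.mp ((insortR_perm x ys).mem_iff.mp hz) with h' | h'
      · exact h' ▸ hyx
      · exact hy z h'
    · rename_i hyx
      refine List.pairwise_cons.mpr ⟨?_, h⟩
      intro z hz
      rcases List.mem_cons.mp hz with h' | h'
      · omega
      · exact le_trans (by omega) (hy z h')

lemma insortR_of_lt (x : Int) (t : List Int) (h : ∀ z ∈ t, x < z) : insortR x t = x :: t := by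
  cases t with
  | nil => rfl
  | cons y ys => simp only [insortR]; rw [if_neg]; have := h y (by simp); omega

lemma asc_pairwise (l : List Int) : (asc l).Pairwise (· ≤ ·) :=
  PySem.List.sorted_pairwise l (fun x => x)

lemma asc_append (l : List Int) (x : Int) : asc (l ++ [x]) = insortR x (asc l) := by
  refine PySem.List.sorted_id_eq_of_perm_of_pairwise _ _ ?_ ?_
  · exact (insortR_perm x (asc l)).trans
      (((PySem.List.sorted_perm l (fun x => x) false).cons x).trans (List.perm_append_singleton x l).symm)
  · exact insortR_pairwise x _ (asc_pairwise l)

lemma length_asc (l : List Int) : (asc l).length = l.length :=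
  PySem.List.length_sorted l (fun x => x) false

lemma mem_asc {z : Int} {l : List Int} (h : z ∈ asc l) : z ∈ l :=
  (PySem.List.sorted_perm l (fun x => x) false).mem_iff.mp h

-- descending Python sort is the reverse of the ascending one (identity key, Int values)
lemma desc_eq_reverse_asc (l : List Int) :
    PySem.List.sorted l (fun x => x) true = (asc l).reverse := by
  have h1 : (PySem.List.sorted l (fun x => x) true).reverse = asc l := by
    refine PySem.List.eq_of_perm_of_pairwise_le_of_injective (fun x : Int => x)
      (fun a b h => h) ?_ ?_ (asc_pairwise l)
    · exact ((List.reverse_perm _).trans (PySem.List.sorted_perm l _ true)).trans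
        (PySem.List.sorted_perm l _ false).symm
    · exact List.pairwise_reverse.mpr (PySem.List.sorted_pairwise_rev l _)
  calc PySem.List.sorted l (fun x => x) true
      = (PySem.List.sorted l (fun x => x) true).reverse.reverse := (List.reverse_reverse _).symm
    _ = (asc l).reverse := by rw [h1]

-- A's loop condition at candidate m, written through gsum
lemma cond_iff (n k : Int) (enemy : List Int) (hk : 0 ≤ k) (m : Int) (hm : 0 ≤ m) :
    (n ≥ (PySem.List.slice (PySem.List.sorted (PySem.List.slice enemy none (some m)) (fun x => x) true) (some k) none).sum)
      ↔ gsum k.toNat enemy m.toNat ≤ n := by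
  rw [PySem.List.slice_to enemy hm, PySem.List.slice_from _ hk, desc_eq_reverse_asc,
    List.drop_reverse, List.sum_reverse, gsum, length_asc]

-- joint step lemma: inserting into the kept suffix, then popping its head
lemma insort_step (x : Int) (t : List Int) (hs : t.Pairwise (· ≤ ·)) (d : Nat) :
    (insortR x (t.drop d)).tail = (insortR x t).drop (d + 1) ∧
    (t.take d).sum + (insortR x (t.drop d)).head! = ((insortR x t).take (d + 1)).sum := by
  induction t generalizing d with
  | nil => simp [insortR]
  | cons y ys ih =>
    rcases List.pairwise_cons.mp hs with ⟨hy, hys⟩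
    cases d with
    | zero =>
      refine ⟨by simp [List.drop_one], ?_⟩
      simp only [List.drop_zero, List.take_zero, List.sum_nil, Int.zero_add]
      cases h : insortR x (y :: ys) with
      | nil => exact absurd h (insortR_ne_nil x _)
      | cons v rest => simp [h]
    | succ d =>
      simp only [List.drop_succ_cons, List.take_succ_cons, List.sum_cons]
      by_cases hxy : y ≤ x
      · have := ih hys d
        simp only [insortR, if_pos hxy, List.drop_succ_cons, List.take_succ_cons, List.sum_cons]
        exact ⟨this.1, by omega⟩
      · have hlt : ∀ z ∈ ys.drop d, x < z := by
          intro z hz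
          have := hy z (List.mem_of_mem_drop hz); omega
        rw [insortR_of_lt x _ hlt]
        simp only [insortR, if_neg hxy, List.drop_succ_cons, List.take_succ_cons, List.sum_cons,
          List.tail_cons, List.head!]
        exact ⟨trivial, by omega⟩

-- inserting one more nonneg element cannot decrease the fought prefix sum
lemma sum_take_insortR (x : Int) (hx : 0 ≤ x) (t : List Int) (ht : ∀ y ∈ t, 0 ≤ y) (q : Nat) :
    (t.take q).sum ≤ ((insortR x t).take (q + 1)).sum := by
  induction t generalizing q with
  | nil => simpa [insortR] using hx
  | cons y ys ih =>
    have hy : 0 ≤ y := ht y (by simp)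
    have hys : ∀ z ∈ ys, 0 ≤ z := fun z hz => ht z (by simp [hz])
    cases q with
    | zero =>
      simp only [List.take_zero, List.sum_nil]
      simp only [insortR]; split
      · simp only [List.take_succ_cons, List.take_zero, List.sum_cons, List.sum_nil]
        omega
      · simp only [List.take_succ_cons, List.take_zero, List.sum_cons, List.sum_nil]
        omega
    | succ q =>
      simp only [List.take_succ_cons, List.sum_cons]
      simp only [insortR]; split
      · simp only [List.take_succ_cons, List.sum_cons]
        have := ih hys q; omega
      · simp only [List.take_succ_cons, List.sum_cons]
        have h1 : ((y :: ys).take (q + 1)).sum ≤ ((y :: ys).take (q + 1)).sum := le_rfl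
        simp only [List.take_succ_cons, List.sum_cons] at h1 ⊢
        omega

lemma take_succ_eq (enemy : List Int) (m : Nat) (hm : m < enemy.length) :
    enemy.take (m + 1) = enemy.take m ++ [enemy[m]] := by
  rw [List.take_succ, List.getElem?_eq_getElem hm]; rfl

lemma gsum_step (K : Nat) (enemy : List Int) (hnn : ∀ e ∈ enemy, 0 ≤ e) (m : Nat)
    (hm : m < enemy.length) : gsum K enemy m ≤ gsum K enemy (m + 1) := by
  have hx : 0 ≤ enemy[m] := hnn _ (enemy.getElem_mem hm)
  have hlen : (enemy.take m).length = m := by simp [List.length_take]; omega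
  have hlen' : (enemy.take (m + 1)).length = m + 1 := by simp [List.length_take]; omega
  unfold gsum
  rw [take_succ_eq enemy m hm, asc_append, hlen]
  have hlen2 : (enemy.take m ++ [enemy[m]]).length = m + 1 := by
    rw [List.length_append, hlen]; rfl
  rw [hlen2]
  by_cases hK : m + 1 ≤ K
  · have h1 : m - K = 0 := by omega
    have h2 : m + 1 - K = 0 := by omega
    simp [h1, h2]
  · have h2 : m + 1 - K = (m - K) + 1 := by omega
    rw [h2]
    exact sum_take_insortR enemy[m] hx (asc (enemy.take m))
      (fun y hy => hnn y (List.mem_of_mem_take (mem_asc hy))) (m - K)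

lemma gsum_mono (K : Nat) (enemy : List Int) (hnn : ∀ e ∈ enemy, 0 ≤ e) :
    ∀ a b : Nat, a ≤ b → b ≤ enemy.length → gsum K enemy a ≤ gsum K enemy b := by
  intro a b
  induction b with
  | zero => intro h _; interval_cases a; exact le_rfl
  | succ b ih =>
    intro hab hb
    rcases Nat.lt_or_ge a (b + 1) with h | h
    · exact le_trans (ih (by omega) (by omega)) (gsum_step K enemy hnn b (by omega))
    · have : a = b + 1 := by omega
      subst this; exact le_rfl

lemma F_threshold (n : Int) (K : Nat) (enemy : List Int) (hnn : ∀ e ∈ enemy, 0 ≤ e)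
    (m : Nat) (hm : m ≤ enemy.length) :
    gsum K enemy m ≤ n ↔ m < Fnat n K enemy := by
  have hFdef : Fnat n K enemy = Nat.find (Fex n K enemy) := rfl
  rw [hFdef]
  constructor
  · intro hg
    by_contra hF
    have hFm : Nat.find (Fex n K enemy) ≤ m := by omega
    rcases Nat.find_spec (Fex n K enemy) with h | ⟨_, h2⟩
    · omega
    · have := gsum_mono K enemy hnn _ _ hFm hm
      omega
  · intro hF
    have := (Nat.lt_find_iff (Fex n K enemy) m).mp hF m le_rfl
    push_neg at this
    rcases Classical.em (n < gsum K enemy m) with h | h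
    · exact absurd (this.2 hm) (by omega)
    · omega

-- A's binary search over a threshold predicate computes max(ans, min(rt, F-1)) (when anything holds)
lemma loopA_eq (n : Int) (k : Int) (enemy : List Int) (Fi : Int) :
    ∀ (fuel : Nat) (lt rt ans : Int), (rt + 1 - lt).toNat < fuel →
    (∀ m : Int, lt ≤ m → m ≤ rt →
      ((n ≥ (PySem.List.slice (PySem.List.sorted (PySem.List.slice enemy none (some m)) (fun x => x) true) (some k) none).sum) ↔ m < Fi)) →
    loopA n k enemy fuel lt rt ans = if lt ≤ rt ∧ lt < Fi then max ans (min rt (Fi - 1)) else ans := by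
  intro fuel
  induction fuel with
  | zero => intro lt rt ans hf; omega
  | succ f ih =>
    intro lt rt ans hf hthr
    rw [loopA]
    by_cases hlr : lt ≤ rt
    · rw [if_pos hlr]
      have hmid := PySem.Int.floordiv_two_mid_bounds hlr
      set mid := PySem.Int.floordiv (lt + rt) 2 with hmiddef
      have hthrmid := hthr mid hmid.1 hmid.2
      by_cases hp : n ≥ (PySem.List.slice (PySem.List.sorted (PySem.List.slice enemy none (some mid)) (fun x => x) true) (some k) none).sum
      · rw [if_pos hp]
        have hmF : mid < Fi := hthrmid.mp hp
        rw [ih (mid + 1) rt (max ans mid) (by omega) (fun m h1 h2 => hthr m (by omega) h2)]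
        split_ifs <;> omega
      · rw [if_neg hp]
        have hmF : Fi ≤ mid := by
          by_contra h; exact hp (hthrmid.mpr (by omega))
        rw [ih lt (mid - 1) ans (by omega) (fun m h1 h2 => hthr m h1 (by omega))]
        split_ifs <;> omega
    · rw [if_neg hlr, if_neg (fun hc => hlr hc.1)]

-- B's forward pass returns min(len, max(k, F-1))
lemma loopB_eq (n : Int) (k : Int) (enemy : List Int) (hk : 0 ≤ k)
    (hnn : ∀ e ∈ enemy, 0 ≤ e) :
    ∀ (fuel : Nat) (m : Nat), enemy.length - m ≤ fuel → m ≤ enemy.length →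
    (m ≤ k.toNat ∨ m < Fnat n k.toNat enemy) →
    loopB n k (enemy.length : Int) ((asc (enemy.take m)).drop (m - k.toNat))
        (gsum k.toNat enemy m) (m : Int) (enemy.drop m)
      = min (enemy.length : Int) (max k ((Fnat n k.toNat enemy : Int) - 1)) := by
  intro fuel
  induction fuel with
  | zero =>
    intro m hf hm hpast
    have hme : m = enemy.length := by omega
    subst hme
    rw [List.drop_length]
    show (enemy.length : Int) = _
    have hF : (Fnat n k.toNat enemy : Int) ≥ 0 := by positivity
    have hkk : (k.toNat : Int) = k := by omega
    rcases hpast with h | h <;> omega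
  | succ fuel ih =>
    intro m hf hm hpast
    rcases Nat.eq_or_lt_of_le hm with hme | hmlt
    · subst hme
      rw [List.drop_length]
      show (enemy.length : Int) = _
      have hkk : (k.toNat : Int) = k := by omega
      rcases hpast with h | h <;> omega
    · set K := k.toNat with hKdef
      have hkk : (K : Int) = k := by omega
      set x := enemy[m] with hxdef
      set t := asc (enemy.take m) with htdef
      have hts : t.Pairwise (· ≤ ·) := asc_pairwise _
      have htlen : t.length = m := by
        rw [htdef, length_asc, List.length_take]; omega
      have hstep : asc (enemy.take (m + 1)) = insortR x t := by
        rw [take_succ_eq enemy m hmlt, asc_append]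
      rw [List.drop_eq_getElem_cons hmlt]
      rw [loopB]
      set top' := insortR x (t.drop (m - K)) with htop'
      have hlenvr : top'.length = m - (m - K) + 1 := by
        rw [htop', length_insortR, List.length_drop, htlen]
      by_cases hmK : K ≤ m
      · -- list holds K+1 elements: pop the smallest and check affordability
        have hcond : k < (top'.length : Int) := by
          rw [hlenvr]; omega
        rw [if_pos hcond]
        obtain ⟨hstep1, hstep2⟩ := insort_step x t hts (m - K)
        rw [← htop'] at hstep1 hstep2
        have hd1 : m - K + 1 = m + 1 - K := by omega
        have hgm : gsum K enemy m = (t.take (m - K)).sum := by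
          rw [gsum, ← htdef, List.length_take,
            show min m enemy.length - K = m - K from by omega]
        have hgm1 : gsum K enemy (m + 1) = ((insortR x t).take (m - K + 1)).sum := by
          rw [gsum, hstep, List.length_take,
            show min (m + 1) enemy.length - K = m - K + 1 from by omega]
        have hspent : gsum K enemy m + top'.head! = gsum K enemy (m + 1) := by
          rw [hgm, hgm1, ← hstep2]
        by_cases haff : n < gsum K enemy m + top'.head!
        · rw [if_pos haff]
          -- round m + 1 is the first unaffordable one: B returns m
          have hbad : ¬ (gsum K enemy (m + 1) ≤ n) := by omega
          have hF1 : ¬ (m + 1 < Fnat n K enemy) :=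
            fun hc => hbad ((F_threshold n K enemy hnn (m + 1) (by omega)).mpr hc)
          rcases hpast with hp | hp <;> omega
        · rw [if_neg haff]
          have hgood : gsum K enemy (m + 1) ≤ n := by omega
          have hF1 : m + 1 < Fnat n K enemy :=
            (F_threshold n K enemy hnn (m + 1) (by omega)).mp hgood
          have hrest : top'.tail = (asc (enemy.take (m + 1))).drop (m + 1 - K) := by
            rw [hstep, ← hd1, ← hstep1]
          rw [hrest, hspent]
          have := ih (m + 1) (by omega) (by omega) (Or.inr hF1)
          rw [← this]
          congr 1
      · -- fewer than k kept so far: no round is fought yet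
        have hcond : ¬ (k < (top'.length : Int)) := by
          rw [hlenvr]
          have : m - (m - K) = m := by omega
          rw [this]; omega
        rw [if_neg hcond]
        have hvt : top' = (asc (enemy.take (m + 1))).drop (m + 1 - K) := by
          have h1 : m + 1 - K = 0 := by omega
          have h2 : m - K = 0 := by omega
          rw [hstep, h1, List.drop_zero, htop', h2, List.drop_zero]
        have hg : gsum K enemy m = gsum K enemy (m + 1) := by
          rw [gsum, gsum, List.length_take, List.length_take]
          have h1 : min m enemy.length - K = 0 := by omega
          have h2 : min (m + 1) enemy.length - K = 0 := by omega
          rw [h1, h2]; simp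
        rw [hvt, hg]
        have := ih (m + 1) (by omega) (by omega) (Or.inl (by omega))
        rw [← this]
        congr 1

-- k covers every round: B never pops, so it just walks to the end of the list
lemma loopB_skip (n k mx : Int) :
    ∀ (rem top : List Int) (spent i : Int), (top.length : Int) + (rem.length : Int) ≤ k →
    loopB n k mx top spent i rem = mx := by
  intro rem
  induction rem with
  | nil => intro top spent i h; rw [loopB]
  | cons e es ih =>
    intro top spent i h
    rw [loopB]
    have hlen : ¬ (k < ((insortR e top).length : Int)) := by
      rw [length_insortR]; simp only [List.length_cons] at h; push_cast at h ⊢; omega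
    rw [if_neg hlen]
    exact ih _ _ _ (by
      rw [length_insortR]; simp only [List.length_cons] at h; push_cast at h ⊢; omega)

lemma gsum_of_le (K : Nat) (enemy : List Int) (m : Nat) (h : enemy.length ≤ K) :
    gsum K enemy m = 0 := by
  rw [gsum, show (enemy.take m).length - K = 0 from by simp [List.length_take]; omega]
  simp

lemma asc_nil : asc [] = [] := by
  rw [asc, (PySem.List.sorted_eq_nil_iff _ _ _).mpr rfl]

-- ===== VERDICT (by name: the statement is the Claim_ definition above) =====
theorem solution_spec : Claim_equal_solution := by
  intro n k enemy _ hpre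
  obtain ⟨hk, hdisj⟩ := hpre
  unfold Spec_solution solution solution_alt
  rcases hdisj with hlen | hnn
  · -- k covers every round: both sides return len(enemy)
    rw [loopB_skip n k (enemy.length : Int) enemy [] 0 0 (by simpa using hlen)]
    by_cases hn : 0 ≤ n
    · rw [loopA_eq n k enemy ((enemy.length : Int) + 1) (((enemy.length : Int) + 1 - k).toNat + 1)
        k (enemy.length : Int) (min k (enemy.length : Int)) (by omega)
        (fun m h1 h2 => by
          rw [cond_iff n k enemy hk m (by omega),
            gsum_of_le k.toNat enemy m.toNat (by omega)]
          constructor <;> intro <;> omega)]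
      split_ifs <;> omega
    · rw [loopA_eq n k enemy (enemy.length : Int) (((enemy.length : Int) + 1 - k).toNat + 1)
        k (enemy.length : Int) (min k (enemy.length : Int)) (by omega)
        (fun m h1 h2 => by
          rw [cond_iff n k enemy hk m (by omega),
            gsum_of_le k.toNat enemy m.toNat (by omega)]
          constructor <;> intro <;> omega)]
      split_ifs <;> omega
  set K := k.toNat with hKdef
  have hkk : (K : Int) = k := by omega
  set F := Fnat n K enemy with hFdef
  -- B's side
  have hB : loopB n k (enemy.length : Int) [] 0 0 enemy
      = min (enemy.length : Int) (max k ((F : Int) - 1)) := by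
    have := loopB_eq n k enemy hk hnn (enemy.length) 0 (by omega) (by omega) (Or.inl (by omega))
    simpa [asc_nil, gsum] using this
  -- A's side
  have hA : loopA n k enemy (((enemy.length : Int) + 1 - k).toNat + 1) k (enemy.length : Int)
        (min k (enemy.length : Int))
      = if k ≤ (enemy.length : Int) ∧ k < (F : Int)
        then max (min k (enemy.length : Int)) (min (enemy.length : Int) ((F : Int) - 1))
        else min k (enemy.length : Int) := by
    apply loopA_eq n k enemy (F : Int) (((enemy.length : Int) + 1 - k).toNat + 1) _ _ _ (by omega)
    intro m h1 h2
    have hm0 : 0 ≤ m := le_trans hk h1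
    rw [cond_iff n k enemy hk m hm0]
    rw [F_threshold n K enemy hnn m.toNat (by omega)]
    omega
  rw [hA, hB]
  have hF0 : (0 : Int) ≤ (F : Int) := by positivity
  split_ifs <;> omega
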